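-- pv_equiv track=rewrite | github.com/Jokeren/DPLL | scripts/gen_einstein.py | dnf2cnf
-- ===== SOURCE A (Python) =====
-- def dnf2cnf(dnf):
--     if len(dnf) < 2:
--         return None
--     cnf = []
--     for i in range(len(dnf)):
--         if i == 0:
--             for d in dnf[0]:
--                 cnf += [[d]]
--         else:
--             tmp = []
--             for c in cnf:
--                 for d in dnf[i]:
--                     tmp.append(c + [d])
--             cnf = tmp
--     return cnf
-- ===== SOURCE B (Python) =====
-- def dnf2cnf(dnf):
--     if len(dnf) < 2:
--         return None
--     def prod(lst):
--         if not lst: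
--             return [[]]
--         rest = prod(lst[1:])
--         return [[x] + r for x in lst[0] for r in rest]
--     return prod(dnf)
-- ===== Notes on version B (the rewrite author's own statement) =====
-- stated objective: idiomatic
-- what changed: Replaced the index-driven iterative left-fold accumulator (with a special-cased first iteration) by a recursive right-fold Cartesian product prod(lst) = [[x]+r for x in lst[0] for r in prod(lst[1:])].
import Mathlib
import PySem

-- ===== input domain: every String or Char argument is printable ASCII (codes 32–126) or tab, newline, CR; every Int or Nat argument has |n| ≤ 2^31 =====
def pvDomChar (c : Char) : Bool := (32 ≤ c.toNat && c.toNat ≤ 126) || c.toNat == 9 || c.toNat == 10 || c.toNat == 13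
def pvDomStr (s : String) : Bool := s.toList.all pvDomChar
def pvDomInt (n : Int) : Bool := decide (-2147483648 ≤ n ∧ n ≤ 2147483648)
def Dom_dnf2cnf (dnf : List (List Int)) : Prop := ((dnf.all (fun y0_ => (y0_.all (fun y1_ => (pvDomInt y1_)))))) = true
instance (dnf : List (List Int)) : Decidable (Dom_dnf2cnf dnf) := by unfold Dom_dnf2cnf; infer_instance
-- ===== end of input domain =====

-- B replaces A's index-driven left-fold accumulator by a recursive right-fold Cartesian product (idiomatic; same cost).

-- ===== PORT A =====
-- literal port: 'for i in range(len(dnf))' with the i == 0 special case, and the nested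
-- append loops building tmp from cnf
def dnf2cnf (dnf : List (List Int)) : Option (List (List Int)) :=
  if dnf.length < 2 then none
  else
    some ((PySem.List.pyRange 0 (dnf.length : Int) 1).foldl
      (fun cnf i =>
        if i == 0 then
          (PySem.List.pyGetD dnf 0 []).foldl (fun cnf d => cnf ++ [[d]]) cnf
        else
          cnf.foldl (fun tmp c =>
            (PySem.List.pyGetD dnf i []).foldl (fun tmp d => tmp ++ [c ++ [d]]) tmp) [])
      [])

-- ===== PORT B =====
-- prod(lst): [[]] when lst is empty, else [[x] + r for x in lst[0] for r in prod(lst[1:])]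
def prodAlt : List (List Int) → List (List Int)
  | [] => [[]]
  | c :: rest => c.flatMap (fun x => (prodAlt rest).map (fun r => [x] ++ r))

def dnf2cnf_alt (dnf : List (List Int)) : Option (List (List Int)) :=
  if dnf.length < 2 then none else some (prodAlt dnf)

-- ===== PRECONDITION & SPEC =====
def Spec_dnf2cnf (dnf : List (List Int)) (out : Option (List (List Int))) : Prop := out = dnf2cnf_alt dnf
instance (dnf : List (List Int)) (out : Option (List (List Int))) : Decidable (Spec_dnf2cnf dnf out) := by unfold Spec_dnf2cnf; infer_instance

-- ===== CLAIM (what is proved, stated in full; the proofs are below) =====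
def Claim_equal_dnf2cnf : Prop := ∀ (dnf : List (List Int)), Dom_dnf2cnf dnf → Spec_dnf2cnf dnf (dnf2cnf dnf)

-- ===== LEMMAS AND PROOFS =====

-- A's "else" body on one clause c, as a flatMap
theorem step_eq (acc : List (List Int)) (c : List Int) (init : List (List Int)) :
    acc.foldl (fun tmp p => c.foldl (fun tmp d => tmp ++ [p ++ [d]]) tmp) init =
      init ++ acc.flatMap (fun p => c.map (fun d => p ++ [d])) := by
  induction acc generalizing init with
  | nil => simp
  | cons p acc ih =>
    simp only [List.foldl_cons, List.flatMap_cons]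
    rw [PySem.List.foldl_append_singleton_eq_map (fun d => p ++ [d]) c init, ih,
      List.append_assoc]

-- A's left fold over the remaining clauses computes prodAlt, seeded with any accumulator
theorem fold_eq (cs : List (List Int)) (acc : List (List Int)) :
    cs.foldl (fun cnf c =>
        cnf.foldl (fun tmp p => c.foldl (fun tmp d => tmp ++ [p ++ [d]]) tmp) []) acc =
      acc.flatMap (fun p => (prodAlt cs).map (fun r => p ++ r)) := by
  induction cs generalizing acc with
  | nil => simp [prodAlt]
  | cons c cs ih =>
    simp only [List.foldl_cons]
    rw [ih, step_eq, List.nil_append, List.flatMap_assoc]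
    simp only [prodAlt, List.flatMap_map, List.map_flatMap, List.map_map]
    congr 1; funext p; congr 1; funext d
    simp [List.append_assoc]

-- ===== VERDICT (by name: the statement is the Claim_ definition above) =====
theorem dnf2cnf_spec : Claim_equal_dnf2cnf := by
  intro dnf _
  unfold Spec_dnf2cnf dnf2cnf dnf2cnf_alt
  split
  · rfl
  · rename_i h
    match dnf, h with
    | c0 :: rest, h =>
      congr 1
      have hlen : (0:Int) < ((c0 :: rest).length : Int) := by
        exact_mod_cast Nat.succ_pos rest.length
      rw [PySem.List.pyRange_one_cons hlen]
      simp only [List.foldl_cons]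
      rw [if_pos (show ((0:Int) == 0) = true from rfl),
        show PySem.List.pyGetD (c0 :: rest) 0 [] = c0 from by
          simp [PySem.List.pyGetD, PySem.List.pyGet?, PySem.List.pyIdx?],
        PySem.List.foldl_append_singleton_eq_map (fun d => [d]) c0 [],
        List.nil_append]
      rw [PySem.List.foldl_congr_mem _ _
        (fun cnf i =>
          cnf.foldl (fun tmp c =>
            (PySem.List.pyGetD (c0 :: rest) i []).foldl
              (fun tmp d => tmp ++ [c ++ [d]]) tmp) []) _
        (by
          intro acc x hx
          have hx1 : (1:Int) ≤ x := (PySem.List.mem_pyRange_one.mp hx).1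
          have : (x == 0) = false := by simp; omega
          rw [this]; simp)]
      rw [show (0:Int)+1 = 1 from rfl]
      rw [PySem.List.foldl_pyRange_pyGetD' (c0 :: rest) []
        (fun cnf c => cnf.foldl (fun tmp p =>
          c.foldl (fun tmp d => tmp ++ [p ++ [d]]) tmp) [])
        (c0.map (fun d => [d])) (by norm_num : (0:Int) ≤ 1)]
      simp only [Int.toNat_one, List.drop_succ_cons, List.drop_zero]
      rw [fold_eq]
      simp [prodAlt, List.flatMap_map]
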